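-- pv_equiv track=rewrite | github.com/headsoft-mikhail/adpy_01 | reg_exp/regular_expressions.py | fix_repeats
-- ===== SOURCE A (Python) =====
-- from itertools import groupby
--
-- def fix_repeats(data_list):
--     keyfunc = lambda x: x[0] + x[1]
--     data_list = sorted(data_list, key=keyfunc)
--     clean_data_list = []
--     for grouper, data in groupby(data_list, key=keyfunc):
--         data_variants = list(data)
--         base_data = data_variants[0]
--         if len(data_variants) > 1:
--             for variant in data_variants[1:]:
--                 for i in range(0, len(base_data)):
--                     if base_data[i] == "":
--                         base_data[i] = variant[i]
--         clean_data_list.append(base_data)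
--     return clean_data_list
-- ===== SOURCE B (Python) =====
-- def fix_repeats(data_list):
--     groups = {}
--     for rec in data_list:
--         groups.setdefault(rec[0] + rec[1], []).append(rec)
--     result = []
--     for key in sorted(groups):
--         cols = zip(*groups[key])
--         result.append([next((v for v in col if v != ""), "") for col in cols])
--     return result
-- ===== Notes on version B (the rewrite author's own statement) =====
-- stated objective: idiomatic
-- what changed: Replaces sort+itertools.groupby followed by in-place positional filling of the first record with a dict grouping records by composite key in one pass, then for each sorted key builds the merged record column-wise (zip) taking the first non-empty value of each column; B does not mutate the input records.
import Mathlib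
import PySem

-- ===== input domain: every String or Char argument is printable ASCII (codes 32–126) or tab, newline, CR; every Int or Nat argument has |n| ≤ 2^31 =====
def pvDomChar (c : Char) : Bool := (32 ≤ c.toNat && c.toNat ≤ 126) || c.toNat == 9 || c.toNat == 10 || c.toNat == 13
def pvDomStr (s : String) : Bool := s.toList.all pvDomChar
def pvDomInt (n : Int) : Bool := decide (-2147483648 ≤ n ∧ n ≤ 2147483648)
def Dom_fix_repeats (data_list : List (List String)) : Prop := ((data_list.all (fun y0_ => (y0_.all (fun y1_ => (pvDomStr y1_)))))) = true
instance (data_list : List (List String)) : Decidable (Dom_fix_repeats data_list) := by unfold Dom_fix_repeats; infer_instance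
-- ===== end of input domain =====

-- B replaces sort+groupby with dict grouping plus a column-wise merge over sorted keys; equivalence is
-- about the RETURN value only: A mutates the input's inner lists in place, B does not.

-- keyfunc = lambda x: x[0] + x[1]  (exact under Pre_, where every record has ≥ 2 fields)
def pvKey (x : List String) : String := PySem.List.pyGetD x 0 "" ++ PySem.List.pyGetD x 1 ""

-- ===== PORT A =====
-- inner loop: for i in range(len(base_data)): if base_data[i] == "": base_data[i] = variant[i]
-- transliterated as the index-wise structural recursion over the two records (exact under Pre_,
-- where variant is as long as base_data)
def pvFill : List String → List String → List String
  | [], _ => []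
  | bs, [] => bs
  | b :: bs, v :: vs => (if b = "" then v else b) :: pvFill bs vs

-- itertools.groupby: split into maximal runs of records with equal key
def pvGroups (l : List (List String)) : List (List (List String)) :=
  match l with
  | [] => []
  | x :: xs =>
      (x :: xs.takeWhile (fun y => pvKey y == pvKey x)) ::
        pvGroups (xs.dropWhile (fun y => pvKey y == pvKey x))
  termination_by l.length
  decreasing_by simp only [List.length_cons]; exact Nat.lt_succ_of_le (List.length_dropWhile_le _ xs)

-- base_data = data_variants[0]; the fill loop over data_variants[1:]
def pvMergeA (g : List (List String)) : List String :=
  match g with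
  | [] => []
  | b :: rest => rest.foldl pvFill b

def fix_repeats (data_list : List (List String)) : List (List String) :=
  (pvGroups (PySem.List.sorted data_list pvKey false)).map pvMergeA

-- ===== PORT B =====
-- zip(*rows): list of columns, truncated at the shortest row
def pvZipCols (g : List (List String)) : List (List String) :=
  match g with
  | [] => []
  | r :: rs =>
      if h : (r :: rs).any (fun x => x.isEmpty) then []
      else (r :: rs).map (fun x => x.headD "") :: pvZipCols ((r :: rs).map (fun x => x.tail))
  termination_by (g.headD []).length
  decreasing_by
    simp only [List.headD_cons, List.map_cons]
    have hr : r ≠ [] := by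
      simp only [List.any_cons, Bool.or_eq_true] at h
      push Not at h
      simpa [List.isEmpty_iff] using h.1
    have : r.tail.length < r.length := by
      cases r with
      | nil => exact absurd rfl hr
      | cons a as => simp
    exact this

-- [next((v for v in col if v != ""), "") for col in cols]
def pvMergeB (g : List (List String)) : List String :=
  (pvZipCols g).map (fun col => (col.find? (fun v => v != "")).getD "")

def fix_repeats_alt (data_list : List (List String)) : List (List String) :=
  let groups := data_list.foldl (fun d rec => d.modify (pvKey rec) [] (fun vs => vs ++ [rec])) PySem.Dict.empty
  (PySem.List.sorted groups.keys (fun k => k) false).map (fun k => pvMergeB (groups.getD k []))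

-- ===== PRECONDITION & SPEC =====
-- Pre_ excludes records with fewer than 2 fields (A raises IndexError computing the key) and inputs
-- where two records sharing a key have different lengths, on which A raises IndexError or returns a
-- value kept at the longer length while B truncates the merge to the shortest record.
def Pre_fix_repeats (data_list : List (List String)) : Prop :=
  (∀ r ∈ data_list, 2 ≤ r.length) ∧
  (∀ r ∈ data_list, ∀ s ∈ data_list, pvKey r = pvKey s → r.length = s.length)
instance (data_list : List (List String)) : Decidable (Pre_fix_repeats data_list) := by
  unfold Pre_fix_repeats; infer_instance
def pvWitness_fix_repeats : List (List String) :=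
  [["a", "b", "", "x"], ["a", "b", "y", ""], ["c", "d", "e", "f"]]

def Spec_fix_repeats (data_list : List (List String)) (out : List (List String)) : Prop :=
  out = fix_repeats_alt data_list
instance (data_list : List (List String)) (out : List (List String)) : Decidable (Spec_fix_repeats data_list out) := by unfold Spec_fix_repeats; infer_instance

-- ===== CLAIM (what is proved, stated in full; the proofs are below) =====
def Claim_equal_fix_repeats : Prop := ∀ (data_list : List (List String)), Dom_fix_repeats data_list → Pre_fix_repeats data_list → Spec_fix_repeats data_list (fix_repeats data_list)

-- ===== LEMMAS AND PROOFS =====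

-- abbreviation used throughout the proofs: the fiber of key k in l
def pvFib (l : List (List String)) (k : String) : List (List String) :=
  l.filter (fun r => pvKey r == k)

theorem pvFlatMap_congr {α β : Type} (S : List α) (f g : α → List β)
    (h : ∀ k ∈ S, f k = g k) : S.flatMap f = S.flatMap g := by
  induction S with
  | nil => rfl
  | cons k S ih =>
      simp only [List.flatMap_cons]
      rw [h k (by simp), ih (fun k hk => h k (by simp [hk]))]

theorem pvKey_mem_of_mem_flatMap (S : List String) (fib : String → List (List String))
    (hk : ∀ k ∈ S, ∀ y ∈ fib k, pvKey y = k) (z : List String)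
    (hz : z ∈ S.flatMap fib) : pvKey z ∈ S := by
  rcases List.mem_flatMap.mp hz with ⟨k, hkS, hzf⟩
  rw [hk k hkS z hzf]; exact hkS

theorem pvInsertBy_nil {α : Type} (before : α → α → Bool) (x : α) :
    PySem.List.insertBy before x [] = [x] := rfl

theorem pvInsertBy_cons {α : Type} (before : α → α → Bool) (x y : α) (ys : List α) :
    PySem.List.insertBy before x (y :: ys) =
      if before x y then x :: y :: ys else y :: PySem.List.insertBy before x ys := rfl

theorem pvInsertBy_front {α : Type} (before : α → α → Bool) (x : α) (B : List α)
    (hne : B ≠ []) (h : ∀ y ∈ B, before x y = true) :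
    PySem.List.insertBy before x B = x :: B := by
  cases B with
  | nil => exact absurd rfl hne
  | cons y ys => rw [pvInsertBy_cons, if_pos (h y (by simp))]

theorem pvInsertBy_pass {α : Type} (before : α → α → Bool) (x : α) (A B : List α)
    (h : ∀ y ∈ A, before x y = false) :
    PySem.List.insertBy before x (A ++ B) = A ++ PySem.List.insertBy before x B := by
  induction A with
  | nil => rfl
  | cons a A ih =>
      simp only [List.cons_append, pvInsertBy_cons, h a (by simp), Bool.false_eq_true,
        if_false, List.cons_inj_right]
      exact ih (fun y hy => h y (by simp [hy]))

-- inserting x into a fiber-concatenation: x lands at the END of its key's fiber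
theorem pvIns (S : List String) (fib : String → List (List String)) (x : List String)
    (hp : S.Pairwise (· < ·))
    (hk : ∀ k ∈ S, ∀ y ∈ fib k, pvKey y = k)
    (hne : ∀ k ∈ S, fib k ≠ [])
    (h0 : pvKey x ∉ S → fib (pvKey x) = []) :
    PySem.List.insertBy (fun a b => decide (pvKey a < pvKey b)) x (S.flatMap fib) =
      (if pvKey x ∈ S then S
       else PySem.List.insertBy (fun a b => decide (a < b)) (pvKey x) S).flatMap
        (fun k => if k = pvKey x then fib k ++ [x] else fib k) := by
  induction S with
  | nil =>
      have h0' := h0 (by simp)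
      rw [List.flatMap_nil, pvInsertBy_nil, if_neg (by simp), pvInsertBy_nil]
      simp [h0']
  | cons k S ih =>
      have hklt : ∀ k' ∈ S, k < k' := (List.pairwise_cons.mp hp).1
      have hp' := (List.pairwise_cons.mp hp).2
      have hk' : ∀ k' ∈ S, ∀ y ∈ fib k', pvKey y = k' := fun k' h' => hk k' (by simp [h'])
      have hne' : ∀ k' ∈ S, fib k' ≠ [] := fun k' h' => hne k' (by simp [h'])
      have hkThis : ∀ y ∈ fib k, pvKey y = k := hk k (by simp)
      have hkeyS : ∀ z ∈ S.flatMap fib, k < pvKey z := by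
        intro z hz
        exact hklt _ (pvKey_mem_of_mem_flatMap S fib hk' z hz)
      rcases lt_trichotomy (pvKey x) k with hlt | heq | hgt
      · -- pvKey x < k : x goes to the very front, its key is new and smallest
        have hxnot : pvKey x ∉ k :: S := by
          simp only [List.mem_cons]
          rintro (rfl | hmem)
          · exact lt_irrefl _ hlt
          · exact lt_irrefl _ (lt_trans (lt_trans hlt (hklt _ hmem))
              (lt_of_le_of_ne le_rfl (fun h => absurd h.symm (ne_of_gt (lt_trans hlt (hklt _ hmem))))))
        have hfib0 : fib (pvKey x) = [] := h0 hxnot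
        have hallb : ∀ y ∈ fib k ++ S.flatMap fib,
            (decide (pvKey x < pvKey y)) = true := by
          intro y hy
          rcases List.mem_append.mp hy with hy | hy
          · rw [hkThis y hy]; simpa using hlt
          · simpa using lt_trans hlt (hkeyS y hy)
        rw [List.flatMap_cons,
          pvInsertBy_front _ x _ (by simp [hne k (by simp)]) hallb,
          if_neg hxnot, pvInsertBy_cons]
        rw [if_pos (by simpa using hlt)]
        rw [List.flatMap_cons, List.flatMap_cons, if_pos rfl, hfib0,
          if_neg (fun h => hxnot (by simp [h]))]
        rw [pvFlatMap_congr S _ fib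
          (fun k' h' => if_neg (fun hEq => hxnot (by simp [hEq ▸ h'])))]
        simp
      · -- pvKey x = k : x goes to the end of fiber k
        have hxin : pvKey x ∈ k :: S := by simp [heq]
        have hpassk : ∀ y ∈ fib k, (decide (pvKey x < pvKey y)) = false := by
          intro y hy
          rw [hkThis y hy, heq]
          simp
        have hfront : PySem.List.insertBy (fun a b => decide (pvKey a < pvKey b)) x
            (S.flatMap fib) = x :: S.flatMap fib := by
          cases hFM : S.flatMap fib with
          | nil => rfl
          | cons z zs =>
              refine pvInsertBy_front _ x _ (by simp) ?_
              intro y hy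
              have : k < pvKey y := hkeyS y (hFM ▸ hy)
              rw [heq]
              exact decide_eq_true this
        rw [List.flatMap_cons, pvInsertBy_pass _ x _ _ hpassk, hfront,
          if_pos hxin, List.flatMap_cons, if_pos heq.symm]
        rw [pvFlatMap_congr S _ fib
          (fun k' h' => if_neg (fun hEq => absurd (heq ▸ hEq) (ne_of_gt (hklt _ h'))))]
        simp
      · -- k < pvKey x : x passes fiber k, recurse
        have hkx : k ≠ pvKey x := ne_of_lt hgt
        have hpassk : ∀ y ∈ fib k, (decide (pvKey x < pvKey y)) = false := by
          intro y hy
          rw [hkThis y hy]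
          simpa using le_of_lt hgt
        have h0' : pvKey x ∉ S → fib (pvKey x) = [] := by
          intro hns
          exact h0 (by simp [hns, Ne.symm hkx])
        rw [List.flatMap_cons, pvInsertBy_pass _ x _ _ hpassk,
          ih hp' hk' hne' h0']
        by_cases hxS : pvKey x ∈ S
        · rw [if_pos hxS, if_pos (by simp [hxS]), List.flatMap_cons, if_neg hkx]
        · rw [if_neg hxS, if_neg (by simp [hxS, Ne.symm hkx]), pvInsertBy_cons,
            if_neg (by simpa using not_lt_of_gt hgt), List.flatMap_cons, if_neg hkx]

-- stable sort = fibers laid out in sorted key order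
theorem pvSortedFiber (l : List (List String)) :
    PySem.List.sorted l pvKey false =
      (PySem.List.sorted (PySem.Set.ofList (l.map pvKey)) (fun k => k) false).flatMap
        (pvFib l) := by
  induction l using List.reverseRecOn with
  | nil => rfl
  | append_singleton l x ih =>
      have hfold : PySem.List.sorted (l ++ [x]) pvKey false =
          PySem.List.insertBy (fun a b => decide (pvKey a < pvKey b)) x
            (PySem.List.sorted l pvKey false) := by
        rw [PySem.List.sorted_eq_foldl_insertBy, PySem.List.sorted_eq_foldl_insertBy,
          List.foldl_append, List.foldl_cons, List.foldl_nil]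
      rw [hfold, ih]
      have hp := PySem.List.sorted_ofList_pairwise_lt (κ := String) (List.map pvKey l)
      have hk : ∀ k ∈ PySem.List.sorted (PySem.Set.ofList (l.map pvKey)) (fun k => k) false,
          ∀ y ∈ pvFib l k, pvKey y = k := by
        intro k _ y hy
        have := List.mem_filter.mp hy
        simpa using this.2
      have hne : ∀ k ∈ PySem.List.sorted (PySem.Set.ofList (l.map pvKey)) (fun k => k) false,
          pvFib l k ≠ [] := by
        intro k hkS
        have hkm : k ∈ l.map pvKey :=
          (PySem.Set.mem_ofList _ _).mp ((PySem.List.mem_sorted _ _ _ _).mp hkS)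
        rcases List.mem_map.mp hkm with ⟨r, hr, hkr⟩
        exact List.ne_nil_of_mem (List.mem_filter.mpr ⟨hr, by simp [hkr]⟩)
      have h0 : pvKey x ∉ PySem.List.sorted (PySem.Set.ofList (l.map pvKey)) (fun k => k) false →
          pvFib l (pvKey x) = [] := by
        intro hnm
        have hnm' : pvKey x ∉ l.map pvKey := by
          intro hmem
          exact hnm ((PySem.List.mem_sorted _ _ _ _).mpr ((PySem.Set.mem_ofList _ _).mpr hmem))
        apply List.filter_eq_nil_iff.mpr
        intro r hr
        simp only [beq_iff_eq]
        intro hEq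
        exact hnm' (List.mem_map.mpr ⟨r, hr, hEq⟩)
      rw [pvIns _ _ x hp hk hne h0]
      -- identify the fibers of l ++ [x]
      have hfib' : ∀ k, pvFib (l ++ [x]) k =
          (fun k => if k = pvKey x then pvFib l k ++ [x] else pvFib l k) k := by
        intro k
        simp only [pvFib, List.filter_append]
        by_cases hkk : k = pvKey x
        · subst hkk
          simp
        · have : (pvKey x == k) = false := by simpa using (Ne.symm hkk)
          simp [List.filter, this, hkk]
      -- identify the sorted key lists
      have hkeys : PySem.Set.ofList ((l ++ [x]).map pvKey) =
          (PySem.Set.ofList (l.map pvKey)).add (pvKey x) := by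
        rw [List.map_append, List.map_cons, List.map_nil, PySem.Set.ofList_append_singleton]
      by_cases hmem : pvKey x ∈ PySem.List.sorted (PySem.Set.ofList (l.map pvKey)) (fun k => k) false
      · have hmem' : pvKey x ∈ PySem.Set.ofList (l.map pvKey) :=
          (PySem.List.mem_sorted _ _ _ _).mp hmem
        rw [if_pos hmem, hkeys, PySem.Set.add_of_mem hmem']
        exact (pvFlatMap_congr _ _ _ (fun k _ => (hfib' k).symm))
      · have hmem' : pvKey x ∉ PySem.Set.ofList (l.map pvKey) := fun h =>
          hmem ((PySem.List.mem_sorted _ _ _ _).mpr h)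
        rw [if_neg hmem, hkeys, PySem.Set.add_of_not_mem hmem']
        have hsx : PySem.List.sorted (PySem.Set.ofList (l.map pvKey) ++ [pvKey x]) (fun k => k) false =
            PySem.List.insertBy (fun a b => decide (a < b)) (pvKey x)
              (PySem.List.sorted (PySem.Set.ofList (l.map pvKey)) (fun k => k) false) := by
          rw [PySem.List.sorted_eq_foldl_insertBy, PySem.List.sorted_eq_foldl_insertBy,
            List.foldl_append, List.foldl_cons, List.foldl_nil]
        rw [hsx]
        exact (pvFlatMap_congr _ _ _ (fun k _ => (hfib' k).symm))

theorem pvTakeWhileAll {α : Type} (p : α → Bool) (A B : List α) (h : ∀ a ∈ A, p a = true) :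
    (A ++ B).takeWhile p = A ++ B.takeWhile p := by
  induction A with
  | nil => rfl
  | cons a A ih =>
      simp only [List.cons_append, List.takeWhile_cons, h a (by simp), if_true]
      rw [ih (fun a ha => h a (by simp [ha]))]

theorem pvDropWhileAll {α : Type} (p : α → Bool) (A B : List α) (h : ∀ a ∈ A, p a = true) :
    (A ++ B).dropWhile p = B.dropWhile p := by
  induction A with
  | nil => rfl
  | cons a A ih =>
      simp only [List.cons_append, List.dropWhile_cons, h a (by simp), if_true]
      exact ih (fun a ha => h a (by simp [ha]))

theorem pvTakeWhileNone {α : Type} (p : α → Bool) (B : List α) (h : ∀ b ∈ B, p b = false) :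
    B.takeWhile p = [] := by
  cases B with
  | nil => rfl
  | cons b B => simp [h b (by simp)]

theorem pvDropWhileNone {α : Type} (p : α → Bool) (B : List α) (h : ∀ b ∈ B, p b = false) :
    B.dropWhile p = B := by
  cases B with
  | nil => rfl
  | cons b B => simp [h b (by simp)]

-- groupby over a fiber-concatenation with strictly increasing keys recovers the fibers
theorem pvGroupsFlatMap (S : List String) (fib : String → List (List String))
    (hp : S.Pairwise (· < ·))
    (hk : ∀ k ∈ S, ∀ y ∈ fib k, pvKey y = k)
    (hne : ∀ k ∈ S, fib k ≠ []) :
    pvGroups (S.flatMap fib) = S.map fib := by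
  induction S with
  | nil => simp [pvGroups]
  | cons k S ih =>
      have hx : fib k ≠ [] := hne k (by simp)
      obtain ⟨x, t, hfib⟩ : ∃ x t, fib k = x :: t := by
        cases hfk : fib k with
        | nil => exact absurd hfk hx
        | cons a b => exact ⟨a, b, rfl⟩
      have hkx : pvKey x = k := hk k (by simp) x (by rw [hfib]; simp)
      have hrest : ∀ z ∈ S.flatMap fib, (pvKey z == pvKey x) = false := by
        intro z hz
        have hzS : pvKey z ∈ S :=
          pvKey_mem_of_mem_flatMap S fib (fun k' hk' => hk k' (by simp [hk'])) z hz
        have hlt : k < pvKey z := (List.pairwise_cons.mp hp).1 _ hzS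
        have hne' : pvKey z ≠ pvKey x := by
          rw [hkx]; exact fun hEq => absurd hEq (ne_of_gt hlt)
        simpa using hne'
      have ht : ∀ a ∈ t, (pvKey a == pvKey x) = true := by
        intro a ha
        have : pvKey a = k := hk k (by simp) a (by rw [hfib]; simp [ha])
        simp [this, hkx]
      rw [List.flatMap_cons, hfib, List.cons_append, pvGroups,
        pvTakeWhileAll _ t _ ht, pvTakeWhileNone _ _ hrest,
        pvDropWhileAll _ t _ ht, pvDropWhileNone _ _ hrest,
        ih (List.pairwise_cons.mp hp).2 (fun k' h' => hk k' (by simp [h']))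
          (fun k' h' => hne k' (by simp [h']))]
      rw [List.map_cons, List.append_nil, ← hfib]

theorem pvFill_length (b v : List String) (h : b.length = v.length) :
    (pvFill b v).length = b.length := by
  induction b generalizing v with
  | nil => rfl
  | cons x bs ih =>
      cases v with
      | nil => simp at h
      | cons y vs =>
          simp only [pvFill, List.length_cons] at h ⊢
          rw [ih vs (by omega)]
      
theorem pvFill_getD (b v : List String) (i : Nat) (h : b.length = v.length)
    (hi : i < b.length) :
    (pvFill b v).getD i "" =
      if b.getD i "" = "" then v.getD i "" else b.getD i "" := by
  induction b generalizing v i with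
  | nil => simp at hi
  | cons x bs ih =>
      cases v with
      | nil => simp at h
      | cons y vs =>
          cases i with
          | zero => simp [pvFill]
          | succ j =>
              simp only [pvFill, List.getD_cons_succ]
              exact ih vs j (by simpa using h) (by simpa using hi)

theorem pvSelfMap (b : List String) :
    (List.range b.length).map (fun i => b.getD i "") = b := by
  apply List.ext_getElem (by simp)
  intro i h1 h2
  simp [List.getD_eq_getElem?_getD, List.getElem?_eq_getElem h2]

theorem pvFoldlFill (vs : List (List String)) (b : List String) (n : Nat)
    (hb : b.length = n) (hv : ∀ v ∈ vs, v.length = n) :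
    vs.foldl pvFill b =
      (List.range n).map (fun i =>
        (vs.map (fun v => v.getD i "")).foldl (fun c v => if c = "" then v else c)
          (b.getD i "")) := by
  induction vs generalizing b with
  | nil =>
      subst hb
      exact (pvSelfMap b).symm
  | cons v vs ih =>
      have hvlen : v.length = n := hv v (by simp)
      have hfl : (pvFill b v).length = n := by
        rw [pvFill_length b v (by omega)]; exact hb
      rw [List.foldl_cons, ih (pvFill b v) hfl (fun w hw => hv w (by simp [hw]))]
      apply List.map_congr_left
      intro i hi
      have hin : i < n := List.mem_range.mp hi
      rw [List.map_cons, List.foldl_cons,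
        pvFill_getD b v i (by omega) (by omega)]

theorem pvColFind (cs : List String) (c : String) :
    cs.foldl (fun c v => if c = "" then v else c) c =
      ((c :: cs).find? (fun v => v != "")).getD "" := by
  induction cs generalizing c with
  | nil =>
      by_cases h : c = "" <;> simp [h]
  | cons v cs ih =>
      by_cases h : c = ""
      · simp only [List.foldl_cons, h, if_true]
        rw [ih v]
        simp
      · simp only [List.foldl_cons, if_neg h]
        rw [ih c]
        have hc : (c != "") = true := by simpa using h
        simp [hc]

theorem pvHeadD_getD (r : List String) : r.headD "" = r.getD 0 "" := by
  cases r <;> rfl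

theorem pvZipColsEq (n : Nat) (g : List (List String)) (hg : g ≠ [])
    (hlen : ∀ r ∈ g, r.length = n) :
    pvZipCols g = (List.range n).map (fun i => g.map (fun r => r.getD i "")) := by
  induction n generalizing g with
  | zero =>
      cases g with
      | nil => exact absurd rfl hg
      | cons r rs =>
          have hr : r.isEmpty = true := by
            simpa [List.isEmpty_iff] using hlen r (by simp)
          rw [pvZipCols]
          simp [hr]
  | succ m ih =>
      cases g with
      | nil => exact absurd rfl hg
      | cons r rs =>
          have hnoe : ((r :: rs).any (fun x => x.isEmpty)) = false := by
            simp only [List.any_eq_false]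
            intro x hx
            have := hlen x hx
            simp [List.isEmpty_iff] at this ⊢
            intro hxe; rw [hxe] at this; simp at this
          rw [pvZipCols]
          simp only [hnoe, Bool.false_eq_true, reduceDIte]
          rw [ih ((r :: rs).map (fun x => x.tail)) (by simp)
            (by
              intro t ht
              rcases List.mem_map.mp ht with ⟨x, hx, rfl⟩
              have := hlen x hx
              simp [List.length_tail]
              omega)]
          rw [List.range_succ_eq_map]
          simp only [List.map_cons, List.map_map]
          congr 1
          · rw [pvHeadD_getD r]
            congr 1
            apply List.map_congr_left
            intro x _
            exact pvHeadD_getD x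
          · apply List.map_congr_left
            intro i _
            simp only [Function.comp_apply]
            have hstep : ∀ x ∈ r :: rs, x.tail.getD i "" = x.getD (i + 1) "" := by
              intro x hx
              have hxl := hlen x hx
              cases x with
              | nil => simp at hxl
              | cons a as => simp
            rw [hstep r (by simp)]
            congr 1
            apply List.map_congr_left
            intro x hx
            exact hstep x (by simp [hx])

theorem pvMergeEq (g : List (List String)) (n : Nat) (hg : g ≠ [])
    (hlen : ∀ r ∈ g, r.length = n) :
    pvMergeA g = pvMergeB g := by
  cases g with
  | nil => exact absurd rfl hg
  | cons b vs =>
      have hb : b.length = n := hlen b (by simp)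
      have hA : pvMergeA (b :: vs) = vs.foldl pvFill b := rfl
      rw [hA]
      unfold pvMergeB
      rw [pvFoldlFill vs b n hb (fun v hv => hlen v (by simp [hv])),
        pvZipColsEq n (b :: vs) (by simp) hlen, List.map_map]
      apply List.map_congr_left
      intro i _
      simp only [Function.comp]
      rw [pvColFind, List.map_cons]

-- the grouping loop of B, characterised: lookup at k yields the fiber of k
theorem pvGroupLoop (l : List (List String))
    (d : PySem.Dict String (List (List String))) (k : String) :
    (l.foldl (fun d r => d.modify (pvKey r) [] (fun vs => vs ++ [r])) d).getD k [] =
      d.getD k [] ++ pvFib l k := by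
  have h := PySem.Dict.getD_foldl_modify_append (l.map (fun r => (pvKey r, r))) d k
  rw [List.foldl_map] at h
  rw [h, List.filter_map, List.map_map]
  simp only [Function.comp_def]
  simp [pvFib]

-- ===== VERDICT (by name: the statement is the Claim_ definition above) =====
theorem fix_repeats_spec : Claim_equal_fix_repeats := by
  unfold Claim_equal_fix_repeats
  intro l _hdom hpre
  obtain ⟨_hlen2, hlenEq⟩ := hpre
  unfold Spec_fix_repeats fix_repeats fix_repeats_alt
  dsimp only
  have hkeys :
      (l.foldl (fun d r => d.modify (pvKey r) [] (fun vs => vs ++ [r]))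
        PySem.Dict.empty).keys = PySem.Set.ofList (l.map pvKey) := by
    rw [PySem.Dict.keys_foldl_modify_key l pvKey []
      (fun _ x => fun vs => vs ++ [x]) PySem.Dict.empty]
    simp [PySem.Set.update_nil_left]
  have hgetD : ∀ k,
      (l.foldl (fun d r => d.modify (pvKey r) [] (fun vs => vs ++ [r]))
        PySem.Dict.empty).getD k [] = pvFib l k := by
    intro k
    rw [pvGroupLoop]
    simp
  have hp := PySem.List.sorted_ofList_pairwise_lt (κ := String) (List.map pvKey l)
  have hk : ∀ k ∈ PySem.List.sorted (PySem.Set.ofList (l.map pvKey)) (fun k => k) false,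
      ∀ y ∈ pvFib l k, pvKey y = k := by
    intro k _ y hy
    have := List.mem_filter.mp hy
    simpa using this.2
  have hne : ∀ k ∈ PySem.List.sorted (PySem.Set.ofList (l.map pvKey)) (fun k => k) false,
      pvFib l k ≠ [] := by
    intro k hkS
    have hkm : k ∈ l.map pvKey :=
      (PySem.Set.mem_ofList _ _).mp ((PySem.List.mem_sorted _ _ _ _).mp hkS)
    rcases List.mem_map.mp hkm with ⟨r, hr, hkr⟩
    exact List.ne_nil_of_mem (List.mem_filter.mpr ⟨hr, by simp [hkr]⟩)
  rw [pvSortedFiber l, pvGroupsFlatMap _ _ hp hk hne, List.map_map, hkeys]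
  simp only [hgetD]
  apply List.map_congr_left
  intro k hkS
  simp only [Function.comp_apply]
  have hkm : k ∈ l.map pvKey :=
    (PySem.Set.mem_ofList _ _).mp ((PySem.List.mem_sorted _ _ _ _).mp hkS)
  rcases List.mem_map.mp hkm with ⟨r, hr, hkr⟩
  apply pvMergeEq (pvFib l k) r.length
  · exact List.ne_nil_of_mem (List.mem_filter.mpr ⟨hr, by simp [hkr]⟩)
  · intro s hs
    have hs' := List.mem_filter.mp hs
    have hkey : pvKey s = pvKey r := by
      have : pvKey s = k := by simpa using hs'.2
      rw [this, hkr]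
    exact hlenEq s hs'.1 r hr hkey
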